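-- pv_equiv track=rewrite | github.com/mgorgei/codeeval | c156.py | f
-- ===== SOURCE A (Python) =====
-- def f(s):
--     odd = False
--     result = ""
--     for char in s:
--         if char.isalpha():
--             odd = not odd
--         result += char.upper() if odd else char.lower()
--     return result
-- ===== SOURCE B (Python) =====
-- def f(s):
--     # stage 1: extract the alphabetic subsequence and case it by absolute index parity
--     cased = [c.upper() if i % 2 == 0 else c.lower()
--              for i, c in enumerate(c for c in s if c.isalpha())]
--     # stage 2: re-interleave: each alphabetic slot takes the next cased letter,
--     # non-alphabetic characters pass through unchanged (upper/lower are no-ops on them)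
--     it = iter(cased)
--     return ''.join(next(it) if c.isalpha() else c for c in s)
-- ===== Notes on version B (the rewrite author's own statement) =====
-- stated objective: alternative
-- what changed: Instead of A's single pass carrying a boolean toggle and lower()/upper()-ing every character, B extracts the alphabetic subsequence, cases it by absolute index parity via enumerate, and re-interleaves it into the string, passing non-alphabetic characters through untouched.
import Mathlib
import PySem

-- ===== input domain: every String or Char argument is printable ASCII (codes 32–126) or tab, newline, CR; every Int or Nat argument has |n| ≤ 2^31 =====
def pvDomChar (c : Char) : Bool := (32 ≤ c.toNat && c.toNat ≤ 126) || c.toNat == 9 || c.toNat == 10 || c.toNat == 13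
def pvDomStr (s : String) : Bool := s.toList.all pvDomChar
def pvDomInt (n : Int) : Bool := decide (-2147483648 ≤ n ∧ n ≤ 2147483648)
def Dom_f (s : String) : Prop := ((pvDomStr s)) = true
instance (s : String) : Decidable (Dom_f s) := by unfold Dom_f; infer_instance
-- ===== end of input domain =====

-- B replaces A's toggle-carrying single pass by: extract the alphabetic subsequence, case it by
-- absolute index parity, and re-interleave it, passing non-alphabetic characters through (alternative decomposition).

-- ===== PORT A =====
-- state: (odd, result), exactly A's loop
def f (s : String) : String :=
  String.ofList (s.toList.foldl (fun (st : Bool × List Char) c =>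
    let odd := if PySem.Chars.isalpha c then !st.1 else st.1
    (odd, st.2 ++ [if odd then PySem.Chars.upperChar c else PySem.Chars.lowerChar c]))
    (false, [])).2

-- ===== PORT B =====
-- stage 2 of Source B: ''.join(next(it) if c.isalpha() else c for c in s) — the iterator is the
-- remaining `cased` list; its exhaustion case is unreachable (one cased letter per alphabetic slot)
def pvInterleave : List Char → List Char → List Char
  | [], _ => []
  | c :: cs, ts =>
    if PySem.Chars.isalpha c then
      match ts with
      | t :: ts' => t :: pvInterleave cs ts'
      | [] => []
    else c :: pvInterleave cs ts

-- stage 1 of Source B: enumerate the filtered alphabetic subsequence, upper at even index, lower at odd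
def f_alt (s : String) : String :=
  let cased := (PySem.List.enumerate (s.toList.filter PySem.Chars.isalpha)).map
    (fun ic => if ic.1 % 2 == 0 then PySem.Chars.upperChar ic.2 else PySem.Chars.lowerChar ic.2)
  String.ofList (pvInterleave s.toList cased)

-- ===== PRECONDITION & SPEC =====
def Spec_f (s : String) (out : String) : Prop := out = f_alt s
instance (s : String) (out : String) : Decidable (Spec_f s out) := by unfold Spec_f; infer_instance

-- ===== CLAIM (what is proved, stated in full; the proofs are below) =====
def Claim_equal_f : Prop := ∀ (s : String), Dom_f s → Spec_f s (f s)

-- ===== LEMMAS AND PROOFS =====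

-- reference: A's loop as a structural recursion producing only the emitted characters
def pvGo : List Char → Bool → List Char
  | [], _ => []
  | c :: cs, odd =>
    let o := if PySem.Chars.isalpha c then !odd else odd
    (if o then PySem.Chars.upperChar c else PySem.Chars.lowerChar c) :: pvGo cs o

-- reference: alternately cased list, `odd` = A's parity before the current letter
def pvCaseSeq : Bool → List Char → List Char
  | _, [] => []
  | odd, t :: ts =>
    (if odd then PySem.Chars.lowerChar t else PySem.Chars.upperChar t) :: pvCaseSeq (!odd) ts

theorem pvA_fold (cs : List Char) (odd : Bool) (acc : List Char) :
    (cs.foldl (fun (st : Bool × List Char) c =>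
      let o := if PySem.Chars.isalpha c then !st.1 else st.1
      (o, st.2 ++ [if o then PySem.Chars.upperChar c else PySem.Chars.lowerChar c]))
      (odd, acc)).2 = acc ++ pvGo cs odd := by
  induction cs generalizing odd acc with
  | nil => simp [pvGo]
  | cons c cs ih => rw [List.foldl_cons, ih]; simp [pvGo]

theorem pvNoAlpha_upper (c : Char) (h : PySem.Chars.isalpha c = false) :
    PySem.Chars.upperChar c = c := by
  simp only [PySem.Chars.isalpha, Bool.or_eq_false_iff] at h
  simp [PySem.Chars.upperChar, h.2]

theorem pvNoAlpha_lower (c : Char) (h : PySem.Chars.isalpha c = false) :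
    PySem.Chars.lowerChar c = c := by
  simp only [PySem.Chars.isalpha, Bool.or_eq_false_iff] at h
  simp [PySem.Chars.lowerChar, h.1]

theorem pvEnum_caseSeq (ts : List Char) (n : Int) (hn : 0 ≤ n) :
    (PySem.List.enumerate ts n).map
      (fun ic => if ic.1 % 2 == 0 then PySem.Chars.upperChar ic.2 else PySem.Chars.lowerChar ic.2)
      = pvCaseSeq (n % 2 == 1) ts := by
  induction ts generalizing n with
  | nil => simp [pvCaseSeq, PySem.List.enumerate_nil]
  | cons t ts ih =>
    rw [PySem.List.enumerate_cons, List.map_cons, ih (n + 1) (by omega), pvCaseSeq]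
    have h2 : n % 2 = 0 ∨ n % 2 = 1 := by omega
    rcases h2 with h | h <;>
      simp [h, show (n + 1) % 2 = 1 - n % 2 by omega]

theorem pvMerge_go (cs : List Char) (odd : Bool) :
    pvInterleave cs (pvCaseSeq odd (cs.filter PySem.Chars.isalpha)) = pvGo cs odd := by
  induction cs generalizing odd with
  | nil => simp [pvInterleave, pvGo]
  | cons c cs ih =>
    by_cases h : PySem.Chars.isalpha c = true
    · simp only [List.filter_cons, h, if_true, pvCaseSeq, pvInterleave, pvGo, ih (!odd)]
      cases odd <;> simp
    · have h' : PySem.Chars.isalpha c = false := by simpa using h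
      simp only [List.filter_cons, h', Bool.false_eq_true, if_false, pvInterleave, pvGo, ih odd,
        pvNoAlpha_upper c h', pvNoAlpha_lower c h']
      cases odd <;> simp [h']

-- ===== VERDICT (by name: the statement is the Claim_ definition above) =====
theorem f_spec : Claim_equal_f := by
  intro s _
  show f s = f_alt s
  unfold f f_alt
  dsimp only
  rw [pvA_fold, pvEnum_caseSeq _ 0 le_rfl]
  simp [pvMerge_go]
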